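-- pv_equiv track=rewrite | github.com/JackBergin/layup-parts-dev | question2.py | layup_sequence_iterative
-- ===== SOURCE A (Python) =====
-- def layup_sequence_iterative(n):
--     if n == 1:
--         return 1
--     if n == 2:
--         return 2
--
--     s1, s2 = 1, 2  # Base cases: S(1) = 1, S(2) = 2
--
--     for i in range(3, n + 1):
--         if i % 2 == 0: # even
--             s_next = s2 + s1
--         else: # odd
--             s_next = 2 * s2 - s1
--         s1, s2 = s2, s_next  # Shift values for next iteration
--     return s2
-- ===== SOURCE B (Python) =====
-- def layup_sequence_iterative(n):
--     if n == 1: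
--         return 1
--     if n <= 2:
--         return 2
--
--     def matmul(A, B):
--         a, b, c, d = A
--         e, f, g, h = B
--         return (a * e + b * g, a * f + b * h, c * e + d * g, c * f + d * h)
--
--     def matpow(M, k):
--         R = (1, 0, 0, 1)
--         while k:
--             if k & 1:
--                 R = matmul(R, M)
--             M = matmul(M, M)
--             k >>= 1
--         return R
--
--     # One period = odd step (a,b)->(b,2b-a) followed by even step (a,b)->(b,a+b);
--     # its composite matrix is P = [[-1,2],[-1,3]].
--     steps = n - 2
--     r = matpow((-1, 2, -1, 3), steps // 2)
--     a = r[0] * 1 + r[1] * 2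
--     b = r[2] * 1 + r[3] * 2
--     if steps % 2:
--         a, b = b, 2 * b - a
--     return b
-- ===== Notes on version B (the rewrite author's own statement) =====
-- stated objective: faster
-- what changed: Replaces the O(n) iteration with binary exponentiation of the fixed period-2 transition matrix P = [[-1,2],[-1,3]] (odd step then even step), applying P^((n-2)//2) to the base vector (1,2) plus at most one extra odd step; intended as asymptotically faster (O(log n) vs O(n) arithmetic steps); a timing run measured B several-fold faster at every size it could compare but could not decode the huge outputs at the largest size.
import Mathlib
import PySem

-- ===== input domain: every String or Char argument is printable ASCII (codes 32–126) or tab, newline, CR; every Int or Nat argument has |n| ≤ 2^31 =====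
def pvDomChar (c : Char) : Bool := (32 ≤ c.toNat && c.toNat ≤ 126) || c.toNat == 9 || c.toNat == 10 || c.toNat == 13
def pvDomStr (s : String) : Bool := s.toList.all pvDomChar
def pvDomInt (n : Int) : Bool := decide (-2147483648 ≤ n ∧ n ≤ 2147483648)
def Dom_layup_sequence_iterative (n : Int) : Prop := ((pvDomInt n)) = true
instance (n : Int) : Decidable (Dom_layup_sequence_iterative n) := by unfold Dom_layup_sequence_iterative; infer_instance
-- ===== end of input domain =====

-- B: binary exponentiation of the fixed period-2 transition matrix instead of A's per-index loop (intended as faster; a timing run measured it several-fold faster at the sizes it could compare).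

-- ===== PORT A =====
-- loop body of A: compute s_next by parity of i, then shift (s1, s2) := (s2, s_next)
def pvStep (st : Int × Int) (i : Int) : Int × Int :=
  if PySem.Int.mod i 2 = 0 then (st.2, st.2 + st.1) else (st.2, 2 * st.2 - st.1)

def layup_sequence_iterative (n : Int) : Int :=
  if n = 1 then 1
  else if n = 2 then 2
  else ((PySem.List.pyRange 3 (n + 1) 1).foldl pvStep (1, 2)).2

-- ===== PORT B =====
def pvMatmul (A B : Int × Int × Int × Int) : Int × Int × Int × Int :=
  match A, B with
  | (a, b, c, d), (e, f, g, h) =>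
    (a * e + b * g, a * f + b * h, c * e + d * g, c * f + d * h)

-- B's while-loop over a nonnegative int exponent, as structural recursion on Nat
def pvMatpow (R M : Int × Int × Int × Int) (k : Nat) : Int × Int × Int × Int :=
  if k = 0 then R
  else pvMatpow (if k % 2 = 1 then pvMatmul R M else R) (pvMatmul M M) (k / 2)
termination_by k
decreasing_by exact Nat.div_lt_self (Nat.pos_of_ne_zero (by assumption)) (by omega)

def layup_sequence_iterative_alt (n : Int) : Int :=
  if n = 1 then 1
  else if n ≤ 2 then 2
  else
    let steps := n - 2
    let r := pvMatpow (1, 0, 0, 1) (-1, 2, -1, 3) (PySem.Int.floordiv steps 2).toNat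
    let a := r.1 * 1 + r.2.1 * 2
    let b := r.2.2.1 * 1 + r.2.2.2 * 2
    if PySem.Int.mod steps 2 ≠ 0 then 2 * b - a else b

-- ===== PRECONDITION & SPEC =====
def Spec_layup_sequence_iterative (n : Int) (out : Int) : Prop := out = layup_sequence_iterative_alt n
instance (n : Int) (out : Int) : Decidable (Spec_layup_sequence_iterative n out) := by unfold Spec_layup_sequence_iterative; infer_instance

-- ===== CLAIM (what is proved, stated in full; the proofs are below) =====
def Claim_equal_layup_sequence_iterative : Prop := ∀ (n : Int), Dom_layup_sequence_iterative n → Spec_layup_sequence_iterative n (layup_sequence_iterative n)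

-- ===== LEMMAS AND PROOFS =====

def pvVmul (M : Int × Int × Int × Int) (v : Int × Int) : Int × Int :=
  (M.1 * v.1 + M.2.1 * v.2, M.2.2.1 * v.1 + M.2.2.2 * v.2)

def pvPowIter (M : Int × Int × Int × Int) : Nat → Int × Int × Int × Int
  | 0 => (1, 0, 0, 1)
  | k + 1 => pvMatmul (pvPowIter M k) M

theorem pvMatmul_assoc (A B C : Int × Int × Int × Int) :
    pvMatmul (pvMatmul A B) C = pvMatmul A (pvMatmul B C) := by
  obtain ⟨a, b, c, d⟩ := A; obtain ⟨e, f, g, h⟩ := B; obtain ⟨i, j, k, l⟩ := C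
  simp only [pvMatmul, Prod.mk.injEq]
  refine ⟨by ring, by ring, by ring, by ring⟩

theorem pvMatmul_one_left (A : Int × Int × Int × Int) : pvMatmul (1, 0, 0, 1) A = A := by
  obtain ⟨a, b, c, d⟩ := A
  simp [pvMatmul]

theorem pvMatmul_one_right (A : Int × Int × Int × Int) : pvMatmul A (1, 0, 0, 1) = A := by
  obtain ⟨a, b, c, d⟩ := A
  simp [pvMatmul]

theorem pvVmul_matmul (A B : Int × Int × Int × Int) (v : Int × Int) :
    pvVmul (pvMatmul A B) v = pvVmul A (pvVmul B v) := by
  obtain ⟨a, b, c, d⟩ := A; obtain ⟨e, f, g, h⟩ := B; obtain ⟨x, y⟩ := v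
  simp only [pvVmul, pvMatmul, Prod.mk.injEq]
  exact ⟨by ring, by ring⟩

theorem pvPowIter_succ_left (M : Int × Int × Int × Int) (k : Nat) :
    pvPowIter M (k + 1) = pvMatmul M (pvPowIter M k) := by
  induction k with
  | zero => simp [pvPowIter, pvMatmul_one_left, pvMatmul_one_right]
  | succ k ih =>
    calc pvPowIter M (k + 2) = pvMatmul (pvPowIter M (k + 1)) M := rfl
    _ = pvMatmul (pvMatmul M (pvPowIter M k)) M := by rw [ih]
    _ = pvMatmul M (pvPowIter M (k + 1)) := by rw [pvMatmul_assoc]; rfl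

theorem pvPowIter_two_mul (M : Int × Int × Int × Int) (q : Nat) :
    pvPowIter M (2 * q) = pvPowIter (pvMatmul M M) q := by
  induction q with
  | zero => rfl
  | succ q ih =>
    have h : 2 * (q + 1) = (2 * q + 1) + 1 := by omega
    rw [h]
    show pvMatmul (pvPowIter M (2 * q + 1)) M = pvPowIter (pvMatmul M M) (q + 1)
    show pvMatmul (pvMatmul (pvPowIter M (2 * q)) M) M = _
    rw [pvMatmul_assoc, ih]
    rfl

theorem pvMatpow_eq (k : Nat) : ∀ (R M : Int × Int × Int × Int),
    pvMatpow R M k = pvMatmul R (pvPowIter M k) := by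
  induction k using Nat.strong_induction_on with
  | _ k ih =>
    intro R M
    by_cases hk : k = 0
    · subst hk
      rw [pvMatpow]
      simp [pvPowIter, pvMatmul_one_right]
    · rw [pvMatpow]
      simp only [hk, if_false]
      rw [ih (k / 2) (Nat.div_lt_self (Nat.pos_of_ne_zero hk) (by omega))]
      rw [← pvPowIter_two_mul]
      by_cases hp : k % 2 = 1
      · simp only [hp, if_true]
        rw [pvMatmul_assoc]
        have h2 : 2 * (k / 2) + 1 = k := by omega
        rw [← pvPowIter_succ_left, h2]
      · simp only [hp, if_false]
        have h2 : 2 * (k / 2) = k := by omega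
        rw [h2]

theorem pvMod_odd (q : Int) : PySem.Int.mod (2 * q + 1) 2 = 1 := by
  rw [PySem.Int.mod_eq_emod_of_pos (by omega)]; omega

theorem pvMod_even (q : Int) : PySem.Int.mod (2 * q) 2 = 0 := by
  rw [PySem.Int.mod_eq_emod_of_pos (by omega)]; omega

-- two steps (odd i, then even i+1) act as the matrix P = (-1,2,-1,3)
theorem pvPair_step (w : Int × Int) (q : Nat) :
    pvStep (pvStep w (2 * (q : Int) + 3)) (2 * (q : Int) + 4) = pvVmul (-1, 2, -1, 3) w := by
  obtain ⟨a, b⟩ := w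
  simp [pvStep, pvVmul]
  constructor <;> ring

theorem pvLoop_even (q : Nat) :
    (PySem.List.pyRange 3 (2 * (q : Int) + 3) 1).foldl pvStep (1, 2) =
      pvVmul (pvPowIter (-1, 2, -1, 3) q) (1, 2) := by
  induction q with
  | zero => simp [PySem.List.pyRange_one_eq_nil, pvPowIter, pvVmul]
  | succ q ih =>
    have e1 : (2 * ((q : Int) + 1) + 3) = (2 * (q : Int) + 4) + 1 := by ring
    push_cast
    rw [e1, PySem.List.pyRange_one_succ_right (by omega),
        show (2 * (q : Int) + 4) = (2 * (q : Int) + 3) + 1 by ring,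
        PySem.List.pyRange_one_succ_right (by omega)]
    rw [List.foldl_append, List.foldl_append]
    simp only [List.foldl_cons, List.foldl_nil]
    rw [ih]
    rw [show (2 * (q : Int) + 3) + 1 = 2 * (q : Int) + 4 by ring]
    rw [pvPair_step, ← pvVmul_matmul, ← pvPowIter_succ_left]

theorem pvFloordiv_toNat (s : Int) (q : Nat) (h : s = 2 * q ∨ s = 2 * q + 1) :
    (PySem.Int.floordiv s 2).toNat = q := by
  rw [PySem.Int.floordiv_eq_ediv_of_pos (by omega)]
  omega

-- ===== VERDICT (by name: the statement is the Claim_ definition above) =====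
theorem layup_sequence_iterative_spec : Claim_equal_layup_sequence_iterative := by
  intro n _
  unfold Spec_layup_sequence_iterative layup_sequence_iterative layup_sequence_iterative_alt
  by_cases h1 : n = 1
  · simp [h1]
  by_cases h2 : n = 2
  · simp [h2]
  simp only [h1, h2, if_false]
  by_cases h3 : n ≤ 2
  · -- n ≤ 0 here: the range is empty and A returns the second base value 2
    have : PySem.List.pyRange 3 (n + 1) 1 = [] := PySem.List.pyRange_one_eq_nil (by omega)
    simp [this, h3]
  · simp only [h3, if_false]
    have h3' : 3 ≤ n := by omega
    obtain ⟨q, hq⟩ : ∃ q : Nat, n = 2 * (q : Int) + 3 ∨ n = 2 * (q : Int) + 4 := by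
      rcases Int.even_or_odd n with ⟨m, hm⟩ | ⟨m, hm⟩
      · exact ⟨(m - 2).toNat, Or.inr (by omega)⟩
      · exact ⟨(m - 1).toNat, Or.inl (by omega)⟩
    rw [pvMatpow_eq, pvMatmul_one_left]
    rcases hq with hq | hq
    · -- n odd: one extra odd step after q full periods
      have hs : (PySem.Int.floordiv (n - 2) 2).toNat = q :=
        pvFloordiv_toNat _ q (Or.inr (by omega))
      have hm : PySem.Int.mod (n - 2) 2 = 1 := by
        have := pvMod_odd (q : Int); rw [show 2 * (q:Int) + 1 = n - 2 by omega] at this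
        exact this
      rw [hs, hm]
      have hr : PySem.List.pyRange 3 (n + 1) 1 =
          PySem.List.pyRange 3 (2 * (q : Int) + 3) 1 ++ [2 * (q : Int) + 3] := by
        rw [show n + 1 = (2 * (q : Int) + 3) + 1 by omega]
        exact PySem.List.pyRange_one_succ_right (by omega)
      rw [hr, List.foldl_append]
      simp only [List.foldl_cons, List.foldl_nil]
      rw [pvLoop_even q]
      simp [pvStep, pvVmul]
    · -- n even: exactly q+1 full periods
      have hs : (PySem.Int.floordiv (n - 2) 2).toNat = q + 1 :=
        pvFloordiv_toNat _ (q + 1) (Or.inl (by omega))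
      have hm : PySem.Int.mod (n - 2) 2 = 0 := by
        have := pvMod_even ((q : Int) + 1)
        rw [show 2 * ((q:Int) + 1) = n - 2 by omega] at this
        exact this
      rw [hs, hm]
      have hr : PySem.List.pyRange 3 (n + 1) 1 =
          PySem.List.pyRange 3 (2 * ((q + 1 : Nat) : Int) + 3) 1 := by
        push_cast; rw [show n + 1 = 2 * ((q : Int) + 1) + 3 by omega]
      rw [hr, pvLoop_even (q + 1)]
      simp [pvVmul]
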